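-- pv_equiv track=rewrite | github.com/Shuvikm/Jarvis | voice_synthesis/japanese_tts.py | _has_romaji
-- ===== SOURCE A (Python) =====
-- def _has_romaji(text: str) -> bool:
--     """Check if text contains common Japanese romanji phrases."""
--     japanese_words = [
--         'yokoso', 'watashino', 'sekai', 'keikaku', 'doori',
--         'naruhodo', 'omoshiroi', 'masaka', 'kanpeki', 'muda',
--         'sayonara', 'mata', 'sou ka'
--     ]
--     text_lower = text.lower()
--     return any(word in text_lower for word in japanese_words)
-- ===== SOURCE B (Python) =====
-- def _has_romaji(text: str) -> bool:
--     """Check if text contains common Japanese romanji phrases.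
--
--     Position-wise scan: walk the lowered text left to right and at each
--     position ask whether any phrase starts exactly there."""
--     words = ('yokoso,watashino,sekai,keikaku,doori,naruhodo,omoshiroi,'
--              'masaka,kanpeki,muda,sayonara,mata,sou ka').split(',')
--     t = text.lower()
--     i = 0
--     while True:
--         if any(t.startswith(w, i) for w in words):
--             return True
--         if i == len(t):
--             return False
--         i += 1
-- ===== Notes on version B (the rewrite author's own statement) =====
-- stated objective: alternative
-- what changed: A does a per-word outer loop of whole-text substring scans; B instead walks the lowered text once, position by position (a while loop / structural recursion on the suffix), asking at each position whether any phrase starts exactly there, with the phrase table stored as one comma-separated string split at start-up.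
import Mathlib
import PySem

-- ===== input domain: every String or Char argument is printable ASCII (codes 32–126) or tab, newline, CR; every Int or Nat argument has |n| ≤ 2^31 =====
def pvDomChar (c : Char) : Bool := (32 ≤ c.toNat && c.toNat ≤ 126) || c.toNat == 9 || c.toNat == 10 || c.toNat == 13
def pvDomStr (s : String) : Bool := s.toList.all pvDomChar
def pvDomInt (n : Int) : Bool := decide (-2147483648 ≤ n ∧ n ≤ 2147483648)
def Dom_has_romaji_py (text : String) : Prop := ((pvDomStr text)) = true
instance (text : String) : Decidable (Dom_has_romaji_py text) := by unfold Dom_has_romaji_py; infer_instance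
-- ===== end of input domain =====

-- B replaces A's per-word outer loop of whole-text substring scans by one position-wise
-- walk over the lowered text (structural recursion on the suffix), checking at each
-- position whether any phrase starts there; same cost (alternative), exact same result.


-- ===== PORT A =====
def has_romaji_py (text : String) : Bool :=
  let japanese_words : List String :=
    ["yokoso", "watashino", "sekai", "keikaku", "doori",
     "naruhodo", "omoshiroi", "masaka", "kanpeki", "muda",
     "sayonara", "mata", "sou ka"]
  let text_lower := PySem.Str.lower text
  japanese_words.any (fun word => PySem.Str.isIn word text_lower)

-- ===== PORT B =====
-- Source B's while loop over the index i is ported as structural recursion on the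
-- remaining suffix t[i:] of the lowered text; t.startswith(w, i) with 0 ≤ i ≤ len(t)
-- is exactly Chars.startswith on that suffix (exact here).
def pvScan (words : List String) : List Char → Bool
  | [] => words.any (fun w => PySem.Chars.startswith [] w.toList)
  | c :: rest =>
      if words.any (fun w => PySem.Chars.startswith (c :: rest) w.toList) then true
      else pvScan words rest

def has_romaji_py_alt (text : String) : Bool :=
  -- split(',') with the non-empty separator ',' always succeeds: split? is `some` here (exact)
  let words := (PySem.Str.split?
    "yokoso,watashino,sekai,keikaku,doori,naruhodo,omoshiroi,masaka,kanpeki,muda,sayonara,mata,sou ka" ",").getD []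
  pvScan words (PySem.Str.lower text).toList

-- ===== PRECONDITION & SPEC =====
def Spec_has_romaji_py (text : String) (out : Bool) : Prop := out = has_romaji_py_alt text
instance (text : String) (out : Bool) : Decidable (Spec_has_romaji_py text out) := by unfold Spec_has_romaji_py; infer_instance

-- ===== CLAIM (what is proved, stated in full; the proofs are below) =====
def Claim_equal_has_romaji_py : Prop := ∀ (text : String), Dom_has_romaji_py text → Spec_has_romaji_py text (has_romaji_py text)

-- ===== LEMMAS AND PROOFS =====

-- pvScan finds exactly the words that are a prefix of some suffix, i.e. the infix words.
theorem pvScan_eq_true_iff (words : List String) (t : List Char) :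
    pvScan words t = true ↔ ∃ w ∈ words, ∃ j, w.toList <+: t.drop j := by
  induction t with
  | nil =>
      simp only [pvScan, List.any_eq_true]
      constructor
      · rintro ⟨w, hw, hsw⟩
        exact ⟨w, hw, 0, (PySem.Chars.startswith_iff _ _).mp hsw⟩
      · rintro ⟨w, hw, j, hpre⟩
        simp only [List.drop_nil] at hpre
        exact ⟨w, hw, (PySem.Chars.startswith_iff _ _).mpr hpre⟩
  | cons c rest ih =>
      simp only [pvScan]
      split_ifs with h
      · simp only [true_iff]
        simp only [List.any_eq_true] at h
        obtain ⟨w, hw, hsw⟩ := h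
        exact ⟨w, hw, 0, by simpa using (PySem.Chars.startswith_iff _ _).mp hsw⟩
      · rw [ih]
        constructor
        · rintro ⟨w, hw, j, hpre⟩
          exact ⟨w, hw, j + 1, by simpa using hpre⟩
        · rintro ⟨w, hw, j, hpre⟩
          cases j with
          | zero =>
              exfalso
              exact h (List.any_eq_true.mpr ⟨w, hw,
                (PySem.Chars.startswith_iff _ _).mpr (by simpa using hpre)⟩)
          | succ j => exact ⟨w, hw, j, by simpa using hpre⟩

-- the two word tables are the same list
theorem pv_words_eq :
    (PySem.Str.split?
      "yokoso,watashino,sekai,keikaku,doori,naruhodo,omoshiroi,masaka,kanpeki,muda,sayonara,mata,sou ka" ",").getD []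
    = ["yokoso", "watashino", "sekai", "keikaku", "doori",
       "naruhodo", "omoshiroi", "masaka", "kanpeki", "muda",
       "sayonara", "mata", "sou ka"] := by decide

-- ===== VERDICT (by name: the statement is the Claim_ definition above) =====
theorem has_romaji_py_spec : Claim_equal_has_romaji_py := by
  intro text _
  unfold Spec_has_romaji_py has_romaji_py has_romaji_py_alt
  rw [pv_words_eq, Bool.eq_iff_iff, pvScan_eq_true_iff, List.any_eq_true]
  constructor
  · rintro ⟨w, hw, hin⟩
    obtain ⟨j, hj⟩ := (PySem.Chars.exists_prefix_drop_iff_isIn _ _).mpr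
      ((PySem.Str.isIn_iff_infix _ _).mp hin |> (PySem.Chars.isIn_iff_infix _ _).mpr)
    exact ⟨w, hw, j, hj⟩
  · rintro ⟨w, hw, j, hj⟩
    exact ⟨w, hw, (PySem.Str.isIn_iff_infix _ _).mpr
      ((PySem.Chars.isIn_iff_infix _ _).mp
        ((PySem.Chars.exists_prefix_drop_iff_isIn _ _).mp ⟨j, hj⟩))⟩
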